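-- pv_equiv track=rewrite | github.com/sscott-cccis/advent_of_code_2022 | day1/day1.py | import_data
-- ===== SOURCE A (Python) =====
-- def import_data(raw_lines: list[str]):
--     data = []
--     elf = []
--     for line in raw_lines:
--         line = line.replace("\n", "")
--         if line == "":
--             data.append(elf)
--             elf = []
--             continue
--         elf.append(int(line))
--     data.append(elf)
--     return data
-- ===== SOURCE B (Python) =====
-- def import_data(raw_lines: list[str]):
--     cleaned = [l.replace("\n", "") for l in raw_lines]
--     blanks = [i for i, l in enumerate(cleaned) if l == ""]
--     groups = []
--     start = 0
--     for b in blanks: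
--         groups.append([int(x) for x in cleaned[start:b]])
--         start = b + 1
--     groups.append([int(x) for x in cleaned[start:]])
--     return groups
-- ===== Notes on version B (the rewrite author's own statement) =====
-- stated objective: alternative
-- what changed: Replaces the running-accumulator single pass with a delimiter-index decomposition: blank-line positions are collected first and each group is carved out as a slice between consecutive blank indices.
import Mathlib
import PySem

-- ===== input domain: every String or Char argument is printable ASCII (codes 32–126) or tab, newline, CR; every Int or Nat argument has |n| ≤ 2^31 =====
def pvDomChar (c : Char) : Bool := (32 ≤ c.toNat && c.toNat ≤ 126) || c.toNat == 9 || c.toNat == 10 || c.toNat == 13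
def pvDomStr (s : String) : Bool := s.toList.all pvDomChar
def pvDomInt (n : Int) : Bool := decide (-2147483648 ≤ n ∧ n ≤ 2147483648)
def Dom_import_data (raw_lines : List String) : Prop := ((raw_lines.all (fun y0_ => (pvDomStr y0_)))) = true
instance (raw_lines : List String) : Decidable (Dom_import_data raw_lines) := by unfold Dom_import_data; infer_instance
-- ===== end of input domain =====

-- B replaces A's running-accumulator pass by collecting blank-line indices and slicing out
-- each group between consecutive blank indices (alternative decomposition, same cost).

-- int(line); Pre_ guarantees ofStr? is some wherever this is applied, so getD is never hit
def pvParse (s : String) : Int := (PySem.Int.ofStr? s).getD 0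

-- ===== PORT A =====
def import_data (raw_lines : List String) : List (List Int) :=
  let st := raw_lines.foldl
    (fun (st : List (List Int) × List Int) line =>
      let line := PySem.Str.replace line "\n" ""
      if line == "" then (st.1 ++ [st.2], ([] : List Int))
      else (st.1, st.2 ++ [pvParse line]))
    ([], [])
  st.1 ++ [st.2]

-- ===== PORT B =====
def import_data_alt (raw_lines : List String) : List (List Int) :=
  let cleaned := raw_lines.map (fun l => PySem.Str.replace l "\n" "")
  let blanks := ((PySem.List.enumerate cleaned).filter (fun il => il.2 == "")).map (·.1)
  let st := blanks.foldl
    (fun (st : List (List Int) × Int) b =>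
      (st.1 ++ [(PySem.List.slice cleaned (some st.2) (some b)).map pvParse], b + 1))
    (([] : List (List Int)), (0 : Int))
  st.1 ++ [(PySem.List.slice cleaned (some st.2) none).map pvParse]

-- ===== PRECONDITION & SPEC =====
-- Pre_ excludes exactly the inputs on which Python's int() raises ValueError:
-- every line, after removing newlines, must be empty or an int literal.
def Pre_import_data (raw_lines : List String) : Prop :=
  ∀ line ∈ raw_lines,
    PySem.Str.replace line "\n" "" = "" ∨
    (PySem.Int.ofStr? (PySem.Str.replace line "\n" "")).isSome = true
instance (raw_lines : List String) : Decidable (Pre_import_data raw_lines) := by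
  unfold Pre_import_data; infer_instance
def pvWitness_import_data : List String := ["1\n", "2", "", " -3 "]

def Spec_import_data (raw_lines : List String) (out : List (List Int)) : Prop := out = import_data_alt raw_lines
instance (raw_lines : List String) (out : List (List Int)) : Decidable (Spec_import_data raw_lines out) := by unfold Spec_import_data; infer_instance

-- ===== CLAIM (what is proved, stated in full; the proofs are below) =====
def Claim_equal_import_data : Prop := ∀ (raw_lines : List String), Dom_import_data raw_lines → Pre_import_data raw_lines → Spec_import_data raw_lines (import_data raw_lines)

-- ===== LEMMAS AND PROOFS =====

-- head group and remaining groups of the grouping of an (already cleaned) list of lines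
def pvG : List String → List Int × List (List Int)
  | [] => ([], [])
  | l :: ls =>
    let r := pvG ls
    if l == "" then ([], r.1 :: r.2) else (pvParse l :: r.1, r.2)

-- positions of blank lines
def pvBlanks : List String → List Nat
  | [] => []
  | l :: ls =>
    if l == "" then 0 :: (pvBlanks ls).map (· + 1) else (pvBlanks ls).map (· + 1)

-- A's loop over already-cleaned lines, in recursive form
def pvFoldA : List String → List (List Int) → List Int → List (List Int)
  | [], data, elf => data ++ [elf]
  | l :: ls, data, elf =>
    if l == "" then pvFoldA ls (data ++ [elf]) []
    else pvFoldA ls data (elf ++ [pvParse l])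

-- B's loop over the blank indices, in recursive form
def pvFoldB : List Int → List (List Int) → Int → List String → List (List Int)
  | [], g, s, cl => g ++ [(PySem.List.slice cl (some s) none).map pvParse]
  | b :: bs, g, s, cl =>
    pvFoldB bs (g ++ [(PySem.List.slice cl (some s) (some b)).map pvParse]) (b + 1) cl

lemma foldlA_eq : ∀ (ls : List String) (data : List (List Int)) (elf : List Int),
    (ls.foldl (fun (st : List (List Int) × List Int) l =>
        if l == "" then (st.1 ++ [st.2], ([] : List Int)) else (st.1, st.2 ++ [pvParse l]))
      (data, elf)).1 ++
    [(ls.foldl (fun (st : List (List Int) × List Int) l =>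
        if l == "" then (st.1 ++ [st.2], ([] : List Int)) else (st.1, st.2 ++ [pvParse l]))
      (data, elf)).2] = pvFoldA ls data elf := by
  intro ls
  induction ls with
  | nil => intro data elf; simp [pvFoldA]
  | cons l ls ih =>
    intro data elf
    by_cases h : l = ""
    · simpa [pvFoldA, h] using ih (data ++ [elf]) []
    · simpa [pvFoldA, h] using ih data (elf ++ [pvParse l])

lemma importA_eq (raw : List String) :
    import_data raw = pvFoldA (raw.map (fun l => PySem.Str.replace l "\n" "")) [] [] := by
  rw [import_data, ← foldlA_eq]
  simp [List.foldl_map]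

lemma foldlB_eq : ∀ (bs : List Int) (g : List (List Int)) (s : Int) (cl : List String),
    (bs.foldl (fun (st : List (List Int) × Int) b =>
        (st.1 ++ [(PySem.List.slice cl (some st.2) (some b)).map pvParse], b + 1)) (g, s)).1 ++
    [(PySem.List.slice cl
        (some (bs.foldl (fun (st : List (List Int) × Int) b =>
          (st.1 ++ [(PySem.List.slice cl (some st.2) (some b)).map pvParse], b + 1)) (g, s)).2)
        none).map pvParse] = pvFoldB bs g s cl := by
  intro bs
  induction bs with
  | nil => intro g s cl; simp [pvFoldB]
  | cons b bs ih =>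
    intro g s cl
    simpa [pvFoldB] using
      ih (g ++ [(PySem.List.slice cl (some s) (some b)).map pvParse]) (b + 1) cl

lemma blanksPort_eq : ∀ (cl : List String) (s : Int),
    ((PySem.List.enumerate cl s).filter (fun il => il.2 == "")).map (·.1)
      = List.map (fun n : Nat => s + (n : Int)) (pvBlanks cl) := by
  intro cl
  induction cl with
  | nil => intro s; simp [PySem.List.enumerate_nil, pvBlanks]
  | cons l ls ih =>
    intro s
    rw [PySem.List.enumerate_cons]
    by_cases h : l = ""
    · subst h
      rw [List.filter_cons_of_pos (by simp), List.map_cons]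
      have hb : pvBlanks ("" :: ls) = 0 :: (pvBlanks ls).map (· + 1) := by simp [pvBlanks]
      rw [hb, List.map_cons, List.map_map, ih (s + 1)]
      congr 1
      · simp
      · apply List.map_congr_left
        intro n _
        simp only [Function.comp_apply]
        push_cast
        ring
    · rw [List.filter_cons_of_neg (by simp [h])]
      have hb : pvBlanks (l :: ls) = (pvBlanks ls).map (· + 1) := by simp [pvBlanks, h]
      rw [hb, List.map_map, ih (s + 1)]
      apply List.map_congr_left
      intro n _
      simp only [Function.comp_apply]
      push_cast
      ring

lemma foldB_shift : ∀ (bs : List Nat) (g : List (List Int)) (s k : Nat) (cl : List String),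
    pvFoldB (bs.map (fun n => ((n + k : Nat) : Int))) g ((s + k : Nat) : Int) cl
      = pvFoldB (bs.map (fun n : Nat => (n : Int))) g ((s : Nat) : Int) (cl.drop k) := by
  intro bs
  induction bs with
  | nil =>
    intro g s k cl
    have hd : (cl.drop k).drop s = cl.drop (s + k) := by
      rw [List.drop_drop]
      try congr 1
      try omega
    rw [List.map_nil, List.map_nil, pvFoldB, pvFoldB,
      PySem.List.slice_from_natCast, PySem.List.slice_from_natCast, hd]
  | cons b bs ih =>
    intro g s k cl
    have hd : (cl.drop k).drop s = cl.drop (s + k) := by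
      rw [List.drop_drop]
      try congr 1
      try omega
    rw [List.map_cons, List.map_cons, pvFoldB, pvFoldB]
    have harg : (b + k) - (s + k) = b - s := by omega
    have hsl : PySem.List.slice cl (some ((s + k : Nat) : Int)) (some ((b + k : Nat) : Int))
        = PySem.List.slice (cl.drop k) (some ((s : Nat) : Int)) (some ((b : Nat) : Int)) := by
      rw [PySem.List.slice_natCast, PySem.List.slice_natCast, harg, hd]
    rw [hsl]
    have hb1 : (((b + k : Nat) : Int) + 1) = (((b + 1) + k : Nat) : Int) := by push_cast; ring
    have hb2 : (((b : Nat) : Int) + 1) = (((b + 1 : Nat)) : Int) := by push_cast; ring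
    rw [hb1, hb2]
    exact ih _ (b + 1) k cl

lemma foldB_G : ∀ (ls pre : List String) (g : List (List Int)),
    pvFoldB ((pvBlanks ls).map (fun n => ((n + pre.length : Nat) : Int))) g 0 (pre ++ ls)
      = g ++ ((pre.map pvParse ++ (pvG ls).1) :: (pvG ls).2) := by
  intro ls
  induction ls with
  | nil =>
    intro pre g
    have h0 : (0 : Int) = ((0 : Nat) : Int) := by norm_num
    simp only [pvBlanks, List.map_nil, pvFoldB, pvG]
    rw [h0, PySem.List.slice_from_natCast]
    simp
  | cons l ls ih =>
    intro pre g
    by_cases h : l = ""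
    · subst h
      have hb : pvBlanks ("" :: ls) = 0 :: (pvBlanks ls).map (· + 1) := by simp [pvBlanks]
      rw [hb, List.map_cons, List.map_map, pvFoldB]
      have hsl : PySem.List.slice (pre ++ "" :: ls) (some 0) (some (((0 + pre.length : Nat)) : Int))
          = pre := by
        have h0 : (0 : Int) = ((0 : Nat) : Int) := by norm_num
        rw [h0, PySem.List.slice_natCast]
        simp
      rw [hsl]
      have hmap : (pvBlanks ls).map ((fun n => ((n + pre.length : Nat) : Int)) ∘ (· + 1))
          = (pvBlanks ls).map (fun n => ((n + (pre.length + 1) : Nat) : Int)) := by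
        apply List.map_congr_left
        intro n _
        simp only [Function.comp_apply]
        push_cast
        ring
      have hst : ((((0 + pre.length : Nat)) : Int) + 1) = (((0 + (pre.length + 1) : Nat)) : Int) := by
        push_cast; ring
      rw [hmap, hst, foldB_shift (pvBlanks ls) _ 0 (pre.length + 1) (pre ++ "" :: ls)]
      have hdrop : (pre ++ "" :: ls).drop (pre.length + 1) = ls := by
        rw [← List.drop_drop, List.drop_left]
        simp
      rw [hdrop, Nat.cast_zero]
      have hmap0 : (pvBlanks ls).map (fun n : Nat => (n : Int))
          = (pvBlanks ls).map (fun n => ((n + ([] : List String).length : Nat) : Int)) := by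
        simp
      rw [hmap0]
      have := ih [] (g ++ [pre.map pvParse])
      rw [List.nil_append] at this
      rw [this]
      simp [pvG]
    · have hb : pvBlanks (l :: ls) = (pvBlanks ls).map (· + 1) := by simp [pvBlanks, h]
      rw [hb, List.map_map]
      have hmap : (pvBlanks ls).map ((fun n => ((n + pre.length : Nat) : Int)) ∘ (· + 1))
          = (pvBlanks ls).map (fun n => ((n + (pre ++ [l]).length : Nat) : Int)) := by
        apply List.map_congr_left
        intro n _
        simp only [Function.comp_apply, List.length_append, List.length_cons, List.length_nil]
        push_cast
        ring
      have happ : pre ++ l :: ls = (pre ++ [l]) ++ ls := by simp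
      rw [hmap, happ, ih (pre ++ [l]) g]
      simp [pvG, h]

lemma foldA_G : ∀ (ls : List String) (data : List (List Int)) (elf : List Int),
    pvFoldA ls data elf = data ++ ((elf ++ (pvG ls).1) :: (pvG ls).2) := by
  intro ls
  induction ls with
  | nil => intro data elf; simp [pvFoldA, pvG]
  | cons l ls ih =>
    intro data elf
    by_cases h : l = ""
    · rw [pvFoldA, if_pos (by simp [h]), ih (data ++ [elf]) []]
      simp [pvG, h]
    · rw [pvFoldA, if_neg (by simp [h]), ih data (elf ++ [pvParse l])]
      simp [pvG, h]

lemma importB_eq (raw : List String) :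
    import_data_alt raw
      = pvFoldB (List.map (fun n : Nat => (n : Int)) (pvBlanks (raw.map (fun l => PySem.Str.replace l "\n" ""))))
          [] 0 (raw.map (fun l => PySem.Str.replace l "\n" "")) := by
  rw [import_data_alt, ← foldlB_eq, blanksPort_eq _ 0]
  have h0 : List.map (fun n : Nat => (0 : Int) + (n : Int))
        (pvBlanks (raw.map (fun l => PySem.Str.replace l "\n" "")))
      = List.map (fun n : Nat => (n : Int))
        (pvBlanks (raw.map (fun l => PySem.Str.replace l "\n" ""))) := by
    simp
  rw [h0]

-- ===== VERDICT (by name: the statement is the Claim_ definition above) =====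
theorem import_data_spec : Claim_equal_import_data := by
  intro raw _ _
  unfold Spec_import_data
  rw [importA_eq, importB_eq]
  have hmap : (List.map (fun n : Nat => (n : Int)) (pvBlanks (raw.map (fun l => PySem.Str.replace l "\n" ""))))
      = ((pvBlanks (raw.map (fun l => PySem.Str.replace l "\n" ""))).map
          (fun n => ((n + ([] : List String).length : Nat) : Int))) := by
    simp
  rw [hmap]
  have hB := foldB_G (raw.map (fun l => PySem.Str.replace l "\n" "")) [] []
  rw [List.nil_append] at hB
  rw [hB, foldA_G]
  simp
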